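-- pv_equiv track=rewrite | github.com/mrdavidal/py.checkio.org | remove_all_before.py | remove_all_before
-- ===== SOURCE A (Python) =====
-- from typing import Iterable
--
-- def remove_all_before(items: list, border: int) -> Iterable:
--     # your code here
--     ret_list = []
--     check = 0
--     for item in items:
--         if item == border:
--             check = 1
--         if check == 1:
--             ret_list.append(item)
--     if check == 0:
--         return items
--     return ret_list
-- ===== SOURCE B (Python) =====
-- def remove_all_before(items: list, border: int):
--     try:
--         return items[items.index(border):]
--     except ValueError:
--         return items
-- ===== Notes on version B (the rewrite author's own statement) =====
-- stated objective: simpler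
-- what changed: Replaces A's flag-driven accumulation loop with a find-then-slice: locate the first occurrence with items.index(border) and return items[i:], returning items unchanged when the ValueError says border is absent.
import Mathlib
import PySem

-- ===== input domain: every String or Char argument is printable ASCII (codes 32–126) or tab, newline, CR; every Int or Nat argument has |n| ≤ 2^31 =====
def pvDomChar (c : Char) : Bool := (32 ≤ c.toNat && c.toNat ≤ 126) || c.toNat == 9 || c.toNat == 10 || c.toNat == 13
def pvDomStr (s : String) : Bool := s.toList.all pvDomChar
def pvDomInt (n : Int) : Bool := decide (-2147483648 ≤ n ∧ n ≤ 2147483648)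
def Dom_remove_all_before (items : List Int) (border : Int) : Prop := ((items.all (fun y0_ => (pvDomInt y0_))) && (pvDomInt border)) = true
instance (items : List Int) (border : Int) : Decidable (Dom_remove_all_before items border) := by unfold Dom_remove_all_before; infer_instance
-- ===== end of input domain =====

-- B replaces A's flag-driven accumulation loop with find-then-slice (index + items[i:]); objective: simpler.


-- ===== PORT A =====
-- loop body of A: state (ret_list, check), branches in A's order
def pvStepA (border : Int) (acc : List Int × Int) (item : Int) : List Int × Int :=
  let check := if item = border then 1 else acc.2
  let ret := if check = 1 then acc.1 ++ [item] else acc.1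
  (ret, check)

def remove_all_before (items : List Int) (border : Int) : List Int :=
  let st := items.foldl (pvStepA border) ([], 0)
  if st.2 = 0 then items else st.1

-- ===== PORT B =====
def remove_all_before_alt (items : List Int) (border : Int) : List Int :=
  match PySem.List.index? items border with
  | some i => PySem.List.slice items (some (i : Int)) none  -- items[i:]
  | none => items

-- ===== PRECONDITION & SPEC =====
def Spec_remove_all_before (items : List Int) (border : Int) (out : List Int) : Prop := out = remove_all_before_alt items border
instance (items : List Int) (border : Int) (out : List Int) : Decidable (Spec_remove_all_before items border out) := by unfold Spec_remove_all_before; infer_instance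

-- ===== CLAIM (what is proved, stated in full; the proofs are below) =====
def Claim_equal_remove_all_before : Prop := ∀ (items : List Int) (border : Int), Dom_remove_all_before items border → Spec_remove_all_before items border (remove_all_before items border)

-- ===== LEMMAS AND PROOFS =====

theorem pv_step_one (border : Int) (acc : List Int) (item : Int) :
    pvStepA border (acc, 1) item = (acc ++ [item], 1) := by
  by_cases h : item = border <;> simp [pvStepA, h]

-- once check = 1 the fold just appends every remaining item
theorem pv_fold_one (border : Int) (l : List Int) : ∀ acc : List Int,
    l.foldl (pvStepA border) (acc, 1) = (acc ++ l, 1) := by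
  induction l with
  | nil => simp
  | cons a t ih => intro acc; simp [pv_step_one, ih]

-- before border is seen, the state stays ([], 0)
theorem pv_fold_zero (border : Int) (l : List Int) (h : border ∉ l) :
    l.foldl (pvStepA border) ([], 0) = ([], 0) := by
  induction l with
  | nil => simp
  | cons a t ih =>
    simp only [List.mem_cons, not_or] at h
    have ha : ¬ a = border := fun e => h.1 e.symm
    simp only [List.foldl_cons, pvStepA, ha, if_false]
    simpa using ih h.2

-- if border first occurs at index i, the fold returns (l.drop i, 1)
theorem pv_fold_found (border : Int) (l : List Int) : ∀ i : Nat,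
    PySem.List.index? l border = some i →
    l.foldl (pvStepA border) ([], 0) = (l.drop i, 1) := by
  induction l with
  | nil => intro i h; simp [PySem.List.index?] at h
  | cons a t ih =>
    intro i h
    by_cases ha : a = border
    · subst ha
      rw [PySem.List.index?_cons_self] at h
      have : i = 0 := by simpa using h.symm
      subst this
      simp [pvStepA, pv_fold_one]
    · rw [PySem.List.index?_cons_of_ne _ ha] at h
      rcases hj : PySem.List.index? t border with _ | j
      · rw [hj] at h; simp at h
      · rw [hj] at h
        have hi : i = j + 1 := by simpa using h.symm
        subst hi
        simp only [List.foldl_cons, pvStepA, ha, if_false]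
        simpa [List.drop_succ_cons] using ih j hj

theorem pv_main (items : List Int) (border : Int) :
    remove_all_before items border = remove_all_before_alt items border := by
  unfold remove_all_before remove_all_before_alt
  rcases hidx : PySem.List.index? items border with _ | i
  · rw [pv_fold_zero border items ((PySem.List.index?_eq_none_iff items border).mp hidx)]
    simp
  · rw [pv_fold_found border items i hidx]
    simp [PySem.List.slice_from_natCast]

-- ===== VERDICT (by name: the statement is the Claim_ definition above) =====
theorem remove_all_before_spec : Claim_equal_remove_all_before := by
  intro items border _
  exact pv_main items border
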